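-- pv_equiv track=rewrite | github.com/natestemen/fourier | flagsynth_amatrix.py | brickwork_cnot_estimate
-- ===== SOURCE A (Python) =====
-- BRICKWORK_MIN_LAYERS = {2: 4, 3: 12, 4: 25}
--
-- CORRECTION_CNOT = {2: 1, 3: 6, 4: 14}
--
-- def brickwork_cnot_estimate(n: int) -> int:
--     """Rough CNOT count for brickwork at minimum required layers."""
--     layers = BRICKWORK_MIN_LAYERS.get(n, 0)
--     if layers == 0:
--         return 0
--     # bricks per layer: ceil((n-1)/2) for even, floor((n-1)/2) for odd
--     n_bricks = 0
--     for layer in range(layers):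
--         n_bricks += len(range(layer % 2, n - 1, 2))
--     return 2 * n_bricks + CORRECTION_CNOT.get(n, 0)
-- ===== SOURCE B (Python) =====
-- BRICKWORK_MIN_LAYERS = {2: 4, 3: 12, 4: 25}
--
-- CORRECTION_CNOT = {2: 1, 3: 6, 4: 14}
--
-- def brickwork_cnot_estimate(n: int) -> int:
--     """Rough CNOT count for brickwork at minimum required layers."""
--     layers = BRICKWORK_MIN_LAYERS.get(n, 0)
--     if layers == 0:
--         return 0
--     # closed form: even-offset layers have ceil((n-1)/2) bricks, odd-offset floor((n-1)/2)
--     even_layers = (layers + 1) // 2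
--     odd_layers = layers // 2
--     n_bricks = even_layers * (n // 2) + odd_layers * ((n - 1) // 2)
--     return 2 * n_bricks + CORRECTION_CNOT.get(n, 0)
-- ===== Notes on version B (the rewrite author's own statement) =====
-- stated objective: simpler
-- what changed: Replaced the per-layer loop summing len(range(layer%2, n-1, 2)) with a closed-form count: even- and odd-offset layers contribute n//2 and (n-1)//2 bricks respectively, multiplied by how many layers of each parity there are.
import Mathlib
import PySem

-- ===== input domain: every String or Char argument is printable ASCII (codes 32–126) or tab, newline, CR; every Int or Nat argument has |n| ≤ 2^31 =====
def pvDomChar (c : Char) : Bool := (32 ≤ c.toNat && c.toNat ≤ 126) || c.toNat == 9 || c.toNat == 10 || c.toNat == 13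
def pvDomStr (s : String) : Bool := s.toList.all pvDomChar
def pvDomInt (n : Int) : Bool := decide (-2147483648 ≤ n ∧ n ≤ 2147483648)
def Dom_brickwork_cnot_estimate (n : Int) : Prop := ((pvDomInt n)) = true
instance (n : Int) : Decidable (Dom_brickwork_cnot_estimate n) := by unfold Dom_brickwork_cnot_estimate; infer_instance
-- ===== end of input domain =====

-- B replaces A's per-layer summation loop with a closed-form count (simpler); return value only, no mutation.

-- ===== PORT A =====
def BRICKWORK_MIN_LAYERS : PySem.Dict Int Int := PySem.Dict.ofList [(2, 4), (3, 12), (4, 25)]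

def CORRECTION_CNOT : PySem.Dict Int Int := PySem.Dict.ofList [(2, 1), (3, 6), (4, 14)]

def brickwork_cnot_estimate (n : Int) : Int :=
  let layers := BRICKWORK_MIN_LAYERS.getD n 0
  if layers = 0 then 0
  else
    let n_bricks := (PySem.List.pyRange 0 layers 1).foldl
      (fun acc layer => acc + ((PySem.List.pyRange (PySem.Int.mod layer 2) (n - 1) 2).length : Int)) 0
    2 * n_bricks + CORRECTION_CNOT.getD n 0

-- ===== PORT B =====
def brickwork_cnot_estimate_alt (n : Int) : Int :=
  let layers := BRICKWORK_MIN_LAYERS.getD n 0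
  if layers = 0 then 0
  else
    let even_layers := PySem.Int.floordiv (layers + 1) 2
    let odd_layers := PySem.Int.floordiv layers 2
    let n_bricks := even_layers * PySem.Int.floordiv n 2 + odd_layers * PySem.Int.floordiv (n - 1) 2
    2 * n_bricks + CORRECTION_CNOT.getD n 0

-- ===== PRECONDITION & SPEC =====
def Spec_brickwork_cnot_estimate (n : Int) (out : Int) : Prop := out = brickwork_cnot_estimate_alt n
instance (n : Int) (out : Int) : Decidable (Spec_brickwork_cnot_estimate n out) := by unfold Spec_brickwork_cnot_estimate; infer_instance

-- ===== CLAIM (what is proved, stated in full; the proofs are below) =====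
def Claim_equal_brickwork_cnot_estimate : Prop := ∀ (n : Int), Dom_brickwork_cnot_estimate n → Spec_brickwork_cnot_estimate n (brickwork_cnot_estimate n)

-- ===== LEMMAS AND PROOFS =====
theorem layers_zero_of_ne (n : Int) (h2 : n ≠ 2) (h3 : n ≠ 3) (h4 : n ≠ 4) :
    BRICKWORK_MIN_LAYERS.getD n 0 = 0 := by
  simp [BRICKWORK_MIN_LAYERS, PySem.Dict.getD, PySem.Dict.ofList, PySem.Dict.update,
        PySem.Dict.insert, PySem.Dict.empty, PySem.Dict.get?,
        Ne.symm h2, Ne.symm h3, Ne.symm h4]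

-- ===== VERDICT (by name: the statement is the Claim_ definition above) =====
theorem brickwork_cnot_estimate_spec : Claim_equal_brickwork_cnot_estimate := by
  intro n _
  unfold Spec_brickwork_cnot_estimate
  by_cases h2 : n = 2
  · subst h2; decide
  by_cases h3 : n = 3
  · subst h3; decide
  by_cases h4 : n = 4
  · subst h4; decide
  simp [brickwork_cnot_estimate, brickwork_cnot_estimate_alt, layers_zero_of_ne n h2 h3 h4]
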